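-- pv_equiv track=rewrite | github.com/estebanvillasana/financial_tracker | cli/screens/categories/tree.py | build_category_list
-- ===== SOURCE A (Python) =====
-- def _status(active: int) -> str:
--     return "●" if int(active) == 1 else "○"
--
-- def build_category_line(cat: dict, sub_count: int) -> str:
--     """Single line for a category row in the list."""
--     marker = _status(cat["active"])
--     name = cat["category"]
--     mv = int(cat["movements_count"])
--     parts = [f"  {marker} {name}"]
--     if sub_count > 0:
--         label = "sub" if sub_count == 1 else "subs"
--         parts.append(f"{sub_count} {label}")
--     parts.append(f"{mv} mv")
--     if int(cat["movements_count"]) > 0: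
--         parts.append("locked")
--     return "  ·  ".join(parts)
--
-- def build_category_list(
--     categories: list[dict],
--     sub_categories: list[dict],
--     cat_type: str,
--     page_items: list[dict],
-- ) -> list[str]:
--     """Render lines for one page of categories of the given type."""
--     from collections import defaultdict
--
--     sub_counts: dict[int, int] = defaultdict(int)
--     for s in sub_categories:
--         sub_counts[int(s["category_id"])] += 1
--
--     lines: list[str] = []
--     for cat in page_items:
--         lines.append(build_category_line(cat, sub_counts.get(int(cat["id"]), 0)))
--     return lines or ["  (no categories)"]
-- ===== SOURCE B (Python) =====
-- def _status(active: int) -> str: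
--     return "●" if int(active) == 1 else "○"
--
-- def build_category_line(cat: dict, sub_count: int) -> str:
--     """Single line for a category row in the list."""
--     marker = _status(cat["active"])
--     name = cat["category"]
--     mv = int(cat["movements_count"])
--     parts = [f"  {marker} {name}"]
--     if sub_count > 0:
--         label = "sub" if sub_count == 1 else "subs"
--         parts.append(f"{sub_count} {label}")
--     parts.append(f"{mv} mv")
--     if int(cat["movements_count"]) > 0:
--         parts.append("locked")
--     return "  ·  ".join(parts)
--
-- def build_category_list(categories, sub_categories, cat_type, page_items):
--     """Render lines for one page of categories of the given type.
--
--     No pre-built count index: each page item counts its subcategories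
--     by a direct scan of sub_categories."""
--     lines = [
--         build_category_line(
--             cat,
--             sum(1 for s in sub_categories if int(s["category_id"]) == int(cat["id"])),
--         )
--         for cat in page_items
--     ]
--     return lines or ["  (no categories)"]
-- ===== Notes on version B (the rewrite author's own statement) =====
-- stated objective: simpler
-- what changed: B drops A's pre-built defaultdict index of subcategory counts and instead, for each page item, counts matching subcategories by a direct scan of sub_categories, building the lines in one comprehension.
import Mathlib
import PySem

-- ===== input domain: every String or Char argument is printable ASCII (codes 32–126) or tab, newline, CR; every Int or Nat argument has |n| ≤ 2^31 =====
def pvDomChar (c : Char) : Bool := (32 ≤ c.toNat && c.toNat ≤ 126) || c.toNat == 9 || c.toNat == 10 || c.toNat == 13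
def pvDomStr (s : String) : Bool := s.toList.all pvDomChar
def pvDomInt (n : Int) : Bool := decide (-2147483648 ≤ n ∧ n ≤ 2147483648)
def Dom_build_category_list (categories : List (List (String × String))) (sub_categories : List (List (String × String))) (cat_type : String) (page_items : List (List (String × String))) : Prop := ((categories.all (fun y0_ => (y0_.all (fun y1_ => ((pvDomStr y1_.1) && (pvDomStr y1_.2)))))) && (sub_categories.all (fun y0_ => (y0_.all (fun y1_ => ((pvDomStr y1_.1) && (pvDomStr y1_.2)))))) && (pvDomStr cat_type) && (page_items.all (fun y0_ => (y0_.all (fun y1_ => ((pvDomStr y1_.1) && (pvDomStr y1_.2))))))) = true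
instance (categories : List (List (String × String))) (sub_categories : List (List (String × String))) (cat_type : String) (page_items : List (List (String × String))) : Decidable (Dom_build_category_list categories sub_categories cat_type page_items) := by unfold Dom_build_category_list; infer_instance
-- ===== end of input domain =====

-- ===== PORT A =====
-- B removes A's pre-built count index and counts per item by scanning sub_categories.
-- Note: A raises KeyError/ValueError on missing keys / non-int-like values; Pre_ excludes exactly those
-- inputs, and there the ports' `.getD` defaults are never relied on.
-- shared helpers (module context: _status / build_category_line are used by both A and B)
def pvLookup (d : List (String × String)) (k : String) : Option String :=
  (PySem.Dict.mk d).get? k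
-- int(d[k]); none (KeyError / ValueError) is excluded by Pre_, the 0 default is never reached inside Pre_
def pvInt (d : List (String × String)) (k : String) : Int :=
  ((pvLookup d k).bind PySem.Int.ofStr?).getD 0
def pvStr (d : List (String × String)) (k : String) : String :=
  (pvLookup d k).getD ""

def pvStatus (active : String) : String :=
  if (PySem.Int.ofStr? active).getD 0 = 1 then "●" else "○"

def build_category_line (cat : List (String × String)) (sub_count : Int) : String :=
  let marker := pvStatus (pvStr cat "active")
  let name := pvStr cat "category"
  let mv := pvInt cat "movements_count"
  let parts : List String := ["  " ++ marker ++ " " ++ name]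
  let parts := if sub_count > 0 then
      parts ++ [PySem.Int.toStr sub_count ++ " " ++ (if sub_count = 1 then "sub" else "subs")]
    else parts
  let parts := parts ++ [PySem.Int.toStr mv ++ " mv"]
  let parts := if pvInt cat "movements_count" > 0 then parts ++ ["locked"] else parts
  PySem.Str.join "  ·  " parts

def build_category_list (categories : List (List (String × String))) (sub_categories : List (List (String × String))) (cat_type : String) (page_items : List (List (String × String))) : List String :=
  let sub_counts : PySem.Dict Int Int :=
    sub_categories.foldl (fun d s => d.modify (pvInt s "category_id") 0 (· + 1)) PySem.Dict.empty
  let lines : List String :=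
    page_items.foldl (fun lines cat => lines ++ [build_category_line cat (sub_counts.getD (pvInt cat "id") 0)]) []
  if lines = [] then ["  (no categories)"] else lines

-- ===== PORT B =====
def pvSubCount (sub_categories : List (List (String × String))) (cid : Int) : Int :=
  sub_categories.foldl (fun acc s => if pvInt s "category_id" = cid then acc + 1 else acc) 0

def build_category_list_alt (categories : List (List (String × String))) (sub_categories : List (List (String × String))) (cat_type : String) (page_items : List (List (String × String))) : List String :=
  let lines : List String :=
    page_items.map (fun cat => build_category_line cat (pvSubCount sub_categories (pvInt cat "id")))
  if lines = [] then ["  (no categories)"] else lines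

-- ===== PRECONDITION & SPEC =====
-- Pre_ excludes exactly the inputs where Python A raises: a subcategory without an int-like
-- "category_id", or a page item missing "category" or without int-like "active"/"movements_count"/"id".
def Pre_build_category_list (categories : List (List (String × String))) (sub_categories : List (List (String × String))) (cat_type : String) (page_items : List (List (String × String))) : Prop :=
  (sub_categories.all (fun s => ((pvLookup s "category_id").bind PySem.Int.ofStr?).isSome)
  && page_items.all (fun cat =>
       ((pvLookup cat "active").bind PySem.Int.ofStr?).isSome
       && (pvLookup cat "category").isSome
       && ((pvLookup cat "movements_count").bind PySem.Int.ofStr?).isSome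
       && ((pvLookup cat "id").bind PySem.Int.ofStr?).isSome)) = true
instance (categories : List (List (String × String))) (sub_categories : List (List (String × String))) (cat_type : String) (page_items : List (List (String × String))) : Decidable (Pre_build_category_list categories sub_categories cat_type page_items) := by unfold Pre_build_category_list; infer_instance

def pvWitness_build_category_list : (List (List (String × String))) × (List (List (String × String))) × String × (List (List (String × String))) :=
  ([], [[("category_id", "1")]], "expense",
   [[("id", "1"), ("active", "1"), ("category", "Food"), ("movements_count", "0")]])

def Spec_build_category_list (categories : List (List (String × String))) (sub_categories : List (List (String × String))) (cat_type : String) (page_items : List (List (String × String))) (out : List String) : Prop := out = build_category_list_alt categories sub_categories cat_type page_items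
instance (categories : List (List (String × String))) (sub_categories : List (List (String × String))) (cat_type : String) (page_items : List (List (String × String))) (out : List String) : Decidable (Spec_build_category_list categories sub_categories cat_type page_items out) := by unfold Spec_build_category_list; infer_instance

-- ===== CLAIM (what is proved, stated in full; the proofs are below) =====
def Claim_equal_build_category_list : Prop := ∀ (categories : List (List (String × String))) (sub_categories : List (List (String × String))) (cat_type : String) (page_items : List (List (String × String))), Dom_build_category_list categories sub_categories cat_type page_items → Pre_build_category_list categories sub_categories cat_type page_items → Spec_build_category_list categories sub_categories cat_type page_items (build_category_list categories sub_categories cat_type page_items)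

-- ===== LEMMAS AND PROOFS =====

theorem countFold_aux {α : Type} (f : α → Int) (cid : Int) (l : List α) (a : Int) :
    l.foldl (fun acc s => if f s = cid then acc + 1 else acc) a
      = a + ((l.map f).count cid : Int) := by
  induction l generalizing a with
  | nil => simp
  | cons x xs ih =>
    simp only [List.foldl_cons, List.map_cons, List.count_cons, ih]
    rcases eq_or_ne (f x) cid with h | h
    · simp only [h, BEq.rfl, if_true]
      push_cast; ring
    · rw [if_neg h]
      have hb : (f x == cid) = false := by simpa using h
      rw [hb]
      push_cast; ring

-- A's indexed count equals B's direct scan, for every input (so Pre_ is not needed for the equality).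
theorem subCount_eq (l : List (List (String × String))) (cid : Int) :
    (l.foldl (fun d s => d.modify (pvInt s "category_id") 0 (· + 1)) PySem.Dict.empty).getD cid 0
      = pvSubCount l cid := by
  rw [← List.foldl_map (f := fun s => pvInt s "category_id")
        (g := fun (d : PySem.Dict Int Int) x => d.modify x 0 (· + 1)),
    PySem.Dict.getD_foldl_modify_add_one]
  unfold pvSubCount
  rw [countFold_aux (fun s => pvInt s "category_id")]
  simp [PySem.Dict.getD]

theorem pvWitness_ok : Dom_build_category_list pvWitness_build_category_list.1 pvWitness_build_category_list.2.1 pvWitness_build_category_list.2.2.1 pvWitness_build_category_list.2.2.2 ∧ Pre_build_category_list pvWitness_build_category_list.1 pvWitness_build_category_list.2.1 pvWitness_build_category_list.2.2.1 pvWitness_build_category_list.2.2.2 := by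
  constructor <;> decide

-- ===== VERDICT (by name: the statement is the Claim_ definition above) =====
theorem build_category_list_spec : Claim_equal_build_category_list := by
  intro categories sub_categories cat_type page_items _ _
  simp only [Spec_build_category_list, build_category_list, build_category_list_alt,
    PySem.List.foldl_append_singleton_eq_map, List.nil_append, subCount_eq]
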